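-- pv_equiv track=rewrite | github.com/pawlowiczf/ASD-2022-2023 | Grafy kwiecien 2023/Kolokwia z grafow poprzednie lata/2020-2021/zad1.py | findPossiblePaths
-- ===== SOURCE A (Python) =====
-- def findPossiblePaths(M, d, distance):
--     #
--     n = len(M)
--     G = [ [ [] for _ in range(n) ] for _ in range(n) ]
--
--     for y1 in range(n):
--         for x1 in range(n):
--
--             if d <= distance[y1][x1]:
--
--                 for y2 in range(n):
--                     for x2 in range(n):
--
--                         if y1 != x2 or y2 != x1: # nie moga isc w przeciwne strony przez krawedz jednoczesnie
--
--                             if ( y1 == y2 ) and ( x1 != x2 ) and M[ y1 ][ y2 ] == 0 and M[ x1 ][ x2 ] > 0: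
--                                 if d <= distance[ y2 ][ x2 ]:
--                                     G[ y1 ][ x1 ].append( (y2, x2) )
--
--                             if ( y1 != y2 ) and ( x1 == x2 ) and M[ y1 ][ y2 ] > 0 and M[ x1 ][ x2 ] == 0:
--                                 if d <= distance[ y2 ][ x2 ]:
--                                     G[ y1 ][ x1 ].append( (y2, x2) )
--
--                             if ( y1 != y2 ) and ( x1 != x2 ) and M[ y1 ][ y2 ] > 0 and M[ x1 ][ x2 ] > 0:
--                                 if d <= distance[ y2 ][ x2 ]:
--                                     G[ y1 ][ x1 ].append( (y2, x2) )
--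
--
--                 #end for's 3,4
--     #end for's 1, 2
--
--     return G
-- ===== SOURCE B (Python) =====
-- def findPossiblePaths(M, d, distance):
--     n = len(M)
--     # per-node list of legal single moves: stay (self-loop needs M[v][v]==0) or cross an edge
--     moves = [[w for w in range(n)
--               if (w == v and M[v][v] == 0) or (w != v and M[v][w] > 0)]
--              for v in range(n)]
--     G = [[[] for _ in range(n)] for _ in range(n)]
--     for y1 in range(n):
--         for x1 in range(n):
--             if d <= distance[y1][x1]:
--                 cell = G[y1][x1]
--                 mx = moves[x1]
--                 for y2 in moves[y1]:
--                     for x2 in mx: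
--                         if (y2 != y1 or x2 != x1) and (y1 != x2 or y2 != x1) \
--                            and d <= distance[y2][x2]:
--                             cell.append((y2, x2))
--     return G
-- ===== Notes on version B (the rewrite author's own statement) =====
-- stated objective: alternative
-- what changed: Precomputes per-node legal-move lists once and enumerates only valid (y2,x2) neighbor combinations in row-major order, instead of A's full n*n inner scan with three disjoint case tests per cell.
-- outside the precondition, e.g. on findPossiblePaths([[0], [5]], 10, [[0, 0], [0, 0]]): A returns [[[], []], [[], []]], B raises IndexError
import Mathlib
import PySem

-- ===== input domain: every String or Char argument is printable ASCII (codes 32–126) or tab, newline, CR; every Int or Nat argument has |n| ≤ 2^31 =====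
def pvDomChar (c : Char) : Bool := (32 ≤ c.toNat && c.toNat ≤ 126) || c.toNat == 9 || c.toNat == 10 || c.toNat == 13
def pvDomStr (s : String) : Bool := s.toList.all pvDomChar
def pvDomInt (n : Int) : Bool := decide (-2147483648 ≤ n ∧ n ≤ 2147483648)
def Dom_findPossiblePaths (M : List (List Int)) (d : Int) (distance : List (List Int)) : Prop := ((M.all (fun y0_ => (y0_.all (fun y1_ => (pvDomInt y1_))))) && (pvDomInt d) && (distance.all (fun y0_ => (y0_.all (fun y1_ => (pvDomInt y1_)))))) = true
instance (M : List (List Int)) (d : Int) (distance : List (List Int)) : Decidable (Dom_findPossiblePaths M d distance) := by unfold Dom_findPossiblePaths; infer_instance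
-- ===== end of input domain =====

-- B precomputes per-node legal-move lists once and enumerates only valid neighbor
-- combinations (row-major), instead of A's full n×n inner scan per cell.

-- shared 2-D indexing helper (in-bounds on Pre_, so Python's m[i][j] exactly)
def pv2 (m : List (List Int)) (i j : Nat) : Int := (m.getD i []).getD j 0

-- ===== PORT A =====
def findPossiblePaths (M : List (List Int)) (d : Int) (distance : List (List Int)) : List (List (List (Int × Int))) :=
  let n := M.length
  (List.range n).map fun y1 =>
    (List.range n).map fun x1 =>
      if d ≤ pv2 distance y1 x1 then
        (List.range n).foldl (fun acc y2 =>
          (List.range n).foldl (fun acc x2 =>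
            if y1 ≠ x2 ∨ y2 ≠ x1 then
              let acc1 := if y1 = y2 ∧ x1 ≠ x2 ∧ pv2 M y1 y2 = 0 ∧ 0 < pv2 M x1 x2 ∧ d ≤ pv2 distance y2 x2 then acc ++ [((y2 : Int), (x2 : Int))] else acc
              let acc2 := if y1 ≠ y2 ∧ x1 = x2 ∧ 0 < pv2 M y1 y2 ∧ pv2 M x1 x2 = 0 ∧ d ≤ pv2 distance y2 x2 then acc1 ++ [((y2 : Int), (x2 : Int))] else acc1
              if y1 ≠ y2 ∧ x1 ≠ x2 ∧ 0 < pv2 M y1 y2 ∧ 0 < pv2 M x1 x2 ∧ d ≤ pv2 distance y2 x2 then acc2 ++ [((y2 : Int), (x2 : Int))] else acc2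
            else acc) acc) ([] : List (Int × Int))
      else []

-- ===== PORT B =====
-- legal single moves of one token at node v: stay (needs M[v][v]==0) or cross an edge
def legalMoves (M : List (List Int)) (n v : Nat) : List Nat :=
  (List.range n).filter fun w => decide ((w = v ∧ pv2 M v v = 0) ∨ (w ≠ v ∧ 0 < pv2 M v w))

def findPossiblePaths_alt (M : List (List Int)) (d : Int) (distance : List (List Int)) : List (List (List (Int × Int))) :=
  let n := M.length
  let moves := (List.range n).map (legalMoves M n)
  (List.range n).map fun y1 =>
    (List.range n).map fun x1 =>
      if d ≤ pv2 distance y1 x1 then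
        (moves.getD y1 []).flatMap fun (y2 : Nat) =>
          List.map (fun (x2 : Nat) => ((y2 : Int), (x2 : Int)))
            ((moves.getD x1 []).filter fun x2 =>
              decide ((y2 ≠ y1 ∨ x2 ≠ x1) ∧ (y1 ≠ x2 ∨ y2 ≠ x1) ∧ d ≤ pv2 distance y2 x2))
      else []

-- ===== PRECONDITION & SPEC =====
-- Pre_ requires the first n rows of M and of distance (n = len(M)) to have at least n
-- entries; otherwise Python A generally raises IndexError. It is slightly narrower than
-- A's exact domain: when d exceeds every distance entry A never indexes into M's rows
-- and still returns, while B's precomputation indexes them and raises (see cites).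
def Pre_findPossiblePaths (M : List (List Int)) (d : Int) (distance : List (List Int)) : Prop :=
  M.length ≤ distance.length ∧
  (∀ row ∈ M, M.length ≤ row.length) ∧
  (∀ row ∈ distance.take M.length, M.length ≤ row.length)
instance (M : List (List Int)) (d : Int) (distance : List (List Int)) : Decidable (Pre_findPossiblePaths M d distance) := by unfold Pre_findPossiblePaths; infer_instance

def pvWitness_findPossiblePaths : List (List Int) × Int × List (List Int) :=
  ([[0, 1], [1, 0]], 0, [[0, 1], [1, 0]])

def Spec_findPossiblePaths (M : List (List Int)) (d : Int) (distance : List (List Int)) (out : List (List (List (Int × Int)))) : Prop := out = findPossiblePaths_alt M d distance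
instance (M : List (List Int)) (d : Int) (distance : List (List Int)) (out : List (List (List (Int × Int)))) : Decidable (Spec_findPossiblePaths M d distance out) := by unfold Spec_findPossiblePaths; infer_instance

-- ===== CLAIM (what is proved, stated in full; the proofs are below) =====
def Claim_equal_findPossiblePaths : Prop := ∀ (M : List (List Int)) (d : Int) (distance : List (List Int)), Dom_findPossiblePaths M d distance → Pre_findPossiblePaths M d distance → Spec_findPossiblePaths M d distance (findPossiblePaths M d distance)

-- ===== LEMMAS AND PROOFS =====

-- the combined condition under which A appends (y2,x2) to cell (y1,x1)
abbrev okP (M : List (List Int)) (d : Int) (distance : List (List Int)) (y1 x1 y2 x2 : Nat) : Prop :=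
  ((y2 = y1 ∧ pv2 M y1 y1 = 0) ∨ (y2 ≠ y1 ∧ 0 < pv2 M y1 y2)) ∧
  ((x2 = x1 ∧ pv2 M x1 x1 = 0) ∨ (x2 ≠ x1 ∧ 0 < pv2 M x1 x2)) ∧
  (y2 ≠ y1 ∨ x2 ≠ x1) ∧ (y1 ≠ x2 ∨ y2 ≠ x1) ∧ d ≤ pv2 distance y2 x2

-- A's three-case inner body is one append guarded by okP
set_option maxHeartbeats 2000000 in
lemma bodyA_eq (M : List (List Int)) (d : Int) (distance : List (List Int))
    (y1 x1 y2 x2 : Nat) (acc : List (Int × Int)) :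
    (if y1 ≠ x2 ∨ y2 ≠ x1 then
       let acc1 := if y1 = y2 ∧ x1 ≠ x2 ∧ pv2 M y1 y2 = 0 ∧ 0 < pv2 M x1 x2 ∧ d ≤ pv2 distance y2 x2 then acc ++ [((y2 : Int), (x2 : Int))] else acc
       let acc2 := if y1 ≠ y2 ∧ x1 = x2 ∧ 0 < pv2 M y1 y2 ∧ pv2 M x1 x2 = 0 ∧ d ≤ pv2 distance y2 x2 then acc1 ++ [((y2 : Int), (x2 : Int))] else acc1
       if y1 ≠ y2 ∧ x1 ≠ x2 ∧ 0 < pv2 M y1 y2 ∧ 0 < pv2 M x1 x2 ∧ d ≤ pv2 distance y2 x2 then acc2 ++ [((y2 : Int), (x2 : Int))] else acc2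
     else acc) =
    (if okP M d distance y1 x1 y2 x2 then acc ++ [((y2 : Int), (x2 : Int))] else acc) := by
  unfold okP
  by_cases h1 : y1 = y2 <;> by_cases h2 : x1 = x2 <;>
    (try subst h1) <;> (try subst h2) <;> split_ifs <;> first | rfl | tauto

-- a flatMap may be restricted to the elements where it is nonempty
lemma flatMap_filter_of_nil {α β : Type} (p : α → Bool) (g : α → List β) :
    ∀ (xs : List α), (∀ x ∈ xs, p x = false → g x = []) →
      xs.flatMap g = (xs.filter p).flatMap g := by
  intro xs
  induction xs with
  | nil => intro _; rfl
  | cons a t ih =>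
    intro h
    by_cases hp : p a = true
    · simp [hp, ih fun x hx => h x (List.mem_cons_of_mem a hx)]
    · have hpa : p a = false := by simpa using hp
      simp [hpa, h a (List.mem_cons_self) hpa,
            ih fun x hx => h x (List.mem_cons_of_mem a hx)]

-- one cell of A equals one cell of B
lemma cell_eq (M : List (List Int)) (d : Int) (distance : List (List Int)) (n y1 x1 : Nat) :
    (List.range n).foldl (fun acc y2 =>
        (List.range n).foldl (fun acc x2 =>
          if y1 ≠ x2 ∨ y2 ≠ x1 then
            let acc1 := if y1 = y2 ∧ x1 ≠ x2 ∧ pv2 M y1 y2 = 0 ∧ 0 < pv2 M x1 x2 ∧ d ≤ pv2 distance y2 x2 then acc ++ [((y2 : Int), (x2 : Int))] else acc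
            let acc2 := if y1 ≠ y2 ∧ x1 = x2 ∧ 0 < pv2 M y1 y2 ∧ pv2 M x1 x2 = 0 ∧ d ≤ pv2 distance y2 x2 then acc1 ++ [((y2 : Int), (x2 : Int))] else acc1
            if y1 ≠ y2 ∧ x1 ≠ x2 ∧ 0 < pv2 M y1 y2 ∧ 0 < pv2 M x1 x2 ∧ d ≤ pv2 distance y2 x2 then acc2 ++ [((y2 : Int), (x2 : Int))] else acc2
          else acc) acc) ([] : List (Int × Int)) =
    (legalMoves M n y1).flatMap fun (y2 : Nat) =>
      List.map (fun (x2 : Nat) => ((y2 : Int), (x2 : Int)))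
        ((legalMoves M n x1).filter fun x2 =>
          decide ((y2 ≠ y1 ∨ x2 ≠ x1) ∧ (y1 ≠ x2 ∨ y2 ≠ x1) ∧ d ≤ pv2 distance y2 x2)) := by
  have hfun : ∀ y2 : Nat,
      (fun (acc : List (Int × Int)) (x2 : Nat) =>
        if y1 ≠ x2 ∨ y2 ≠ x1 then
          let acc1 := if y1 = y2 ∧ x1 ≠ x2 ∧ pv2 M y1 y2 = 0 ∧ 0 < pv2 M x1 x2 ∧ d ≤ pv2 distance y2 x2 then acc ++ [((y2 : Int), (x2 : Int))] else acc
          let acc2 := if y1 ≠ y2 ∧ x1 = x2 ∧ 0 < pv2 M y1 y2 ∧ pv2 M x1 x2 = 0 ∧ d ≤ pv2 distance y2 x2 then acc1 ++ [((y2 : Int), (x2 : Int))] else acc1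
          if y1 ≠ y2 ∧ x1 ≠ x2 ∧ 0 < pv2 M y1 y2 ∧ 0 < pv2 M x1 x2 ∧ d ≤ pv2 distance y2 x2 then acc2 ++ [((y2 : Int), (x2 : Int))] else acc2
        else acc) =
      (fun acc x2 =>
        if (fun (x2 : Nat) => decide (okP M d distance y1 x1 y2 x2)) x2 = true then
          acc ++ [(fun (x2 : Nat) => ((y2 : Int), (x2 : Int))) x2] else acc) := by
    intro y2
    funext acc x2
    rw [bodyA_eq]
    simp only [decide_eq_true_eq]
  calc
    _ = (List.range n).foldl (fun acc (y2 : Nat) => acc ++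
          List.map (fun (x2 : Nat) => ((y2 : Int), (x2 : Int)))
            ((List.range n).filter fun (x2 : Nat) => decide (okP M d distance y1 x1 y2 x2)))
          ([] : List (Int × Int)) := by
        apply PySem.List.foldl_congr_mem
        intro acc y2 _
        rw [hfun y2]
        exact PySem.List.foldl_append_if _ _ _ _
    _ = (List.range n).flatMap (fun (y2 : Nat) =>
          List.map (fun (x2 : Nat) => ((y2 : Int), (x2 : Int)))
            ((List.range n).filter fun (x2 : Nat) => decide (okP M d distance y1 x1 y2 x2))) := by
        rw [PySem.List.foldl_append_eq_flatMap]; rfl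
    _ = _ := by
      rw [flatMap_filter_of_nil
            (fun y2 => decide ((y2 = y1 ∧ pv2 M y1 y1 = 0) ∨ (y2 ≠ y1 ∧ 0 < pv2 M y1 y2)))
            _ (List.range n) ?empty]
      · unfold legalMoves
        apply List.flatMap_congr
        intro y2 hy2
        have hy2' : (y2 = y1 ∧ pv2 M y1 y1 = 0) ∨ (y2 ≠ y1 ∧ 0 < pv2 M y1 y2) := by
          simpa using (List.mem_filter.mp hy2).2
        rw [List.filter_filter]
        congr 1
        apply List.filter_congr
        intro x2 _
        rw [Bool.eq_iff_iff]
        simp only [Bool.and_eq_true, decide_eq_true_eq]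
        unfold okP
        tauto
      case empty =>
        intro y2 _ hfalse
        have hny : ¬ ((y2 = y1 ∧ pv2 M y1 y1 = 0) ∨ (y2 ≠ y1 ∧ 0 < pv2 M y1 y2)) := by
          simpa using hfalse
        have hfil : (List.range n).filter (fun (x2 : Nat) => decide (okP M d distance y1 x1 y2 x2)) = [] := by
          apply List.filter_eq_nil_iff.mpr
          intro x2 _
          simp only [decide_eq_true_eq]
          intro hok
          exact hny hok.1
        rw [hfil]
        rfl

-- ===== VERDICT (by name: the statement is the Claim_ definition above) =====
theorem findPossiblePaths_spec : Claim_equal_findPossiblePaths := by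
  intro M d distance _ _
  unfold Spec_findPossiblePaths findPossiblePaths findPossiblePaths_alt
  apply List.map_congr_left
  intro y1 hy1
  apply List.map_congr_left
  intro x1 hx1
  have hy1' : y1 < M.length := List.mem_range.mp hy1
  have hx1' : x1 < M.length := List.mem_range.mp hx1
  rw [PySem.List.getD_map_range _ _ _ _ hy1', PySem.List.getD_map_range _ _ _ _ hx1']
  by_cases hd : d ≤ pv2 distance y1 x1
  · simp only [if_pos hd]
    exact cell_eq M d distance M.length y1 x1
  · simp [if_neg hd]
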